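-- pv_equiv track=rewrite | github.com/thordur03/Thordur_skoli | FORR2HF05CF/aeifingaverkefni/rally.py | Sfinnari
-- ===== SOURCE A (Python) =====
-- def Sfinnari(strengur):
--     sStrentgur = ""
--     for x in strengur:
--         if x == "s" or x == "S":
--             sStrentgur = sStrentgur + x
--         elif x == " ":
--             sStrentgur = sStrentgur + " "
--         else:
--             sStrentgur = sStrentgur + "#"
--     return "öll s í strengnum: "+sStrentgur
-- ===== SOURCE B (Python) =====
-- import re
--
-- def Sfinnari(strengur):
--     return "öll s í strengnum: " + re.sub(r'[^sS ]', '#', strengur)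
-- ===== Notes on version B (the rewrite author's own statement) =====
-- stated objective: idiomatic
-- what changed: Replaced the explicit character loop with repeated string concatenation by a single regex substitution re.sub(r'[^sS ]', '#', strengur).
import Mathlib
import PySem

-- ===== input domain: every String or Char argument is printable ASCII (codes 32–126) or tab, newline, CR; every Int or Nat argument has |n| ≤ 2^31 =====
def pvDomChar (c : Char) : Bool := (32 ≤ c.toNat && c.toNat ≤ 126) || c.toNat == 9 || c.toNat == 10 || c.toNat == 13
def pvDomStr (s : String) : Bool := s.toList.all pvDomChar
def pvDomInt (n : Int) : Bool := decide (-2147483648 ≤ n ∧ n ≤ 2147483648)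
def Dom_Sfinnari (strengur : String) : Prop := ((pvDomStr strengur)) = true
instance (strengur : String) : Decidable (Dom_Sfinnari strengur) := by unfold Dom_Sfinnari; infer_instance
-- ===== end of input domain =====

-- B replaces A's accumulator loop with a single regex substitution [^sS ] → '#' (ported
-- here as the character-wise map that regex performs); objective: idiomatic.

-- ===== PORT A =====
-- literal port of A's loop: fold over the characters, growing the accumulator string
def Sfinnari (strengur : String) : String :=
  let sStrentgur :=
    strengur.toList.foldl
      (fun acc x =>
        if x = 's' ∨ x = 'S' then acc ++ String.ofList [x]
        else if x = ' ' then acc ++ " "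
        else acc ++ "#") ""
  "öll s í strengnum: " ++ sStrentgur

-- ===== PORT B =====
-- re.sub(r'[^sS ]', '#', strengur): the single-char negated class is exactly a per-character
-- substitution, so the port is the corresponding map over the characters (exact on all strings)
def Sfinnari_alt (strengur : String) : String :=
  "öll s í strengnum: " ++
    String.ofList (strengur.toList.map (fun c => if c = 's' ∨ c = 'S' ∨ c = ' ' then c else '#'))

-- ===== PRECONDITION & SPEC =====
def Spec_Sfinnari (strengur : String) (out : String) : Prop := out = Sfinnari_alt strengur
instance (strengur : String) (out : String) : Decidable (Spec_Sfinnari strengur out) := by unfold Spec_Sfinnari; infer_instance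

-- ===== CLAIM (what is proved, stated in full; the proofs are below) =====
def Claim_equal_Sfinnari : Prop := ∀ (strengur : String), Dom_Sfinnari strengur → Spec_Sfinnari strengur (Sfinnari strengur)

-- ===== LEMMAS AND PROOFS =====

theorem ofList_cons' (x : Char) (l : List Char) :
    String.ofList (x :: l) = String.ofList [x] ++ String.ofList l := by
  rw [show x :: l = [x] ++ l from rfl, String.ofList_append]

theorem Sfinnari_foldl (l : List Char) (acc : String) :
    l.foldl
      (fun acc x =>
        if x = 's' ∨ x = 'S' then acc ++ String.ofList [x]
        else if x = ' ' then acc ++ " "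
        else acc ++ "#") acc
    = acc ++ String.ofList (l.map (fun c => if c = 's' ∨ c = 'S' ∨ c = ' ' then c else '#')) := by
  induction l generalizing acc with
  | nil => simp [show String.ofList ([] : List Char) = "" from rfl]
  | cons x l ih =>
    rw [List.foldl_cons, List.map_cons]
    by_cases hs : x = 's' ∨ x = 'S'
    · have hk : (if x = 's' ∨ x = 'S' ∨ x = ' ' then x else '#') = x := by
        rcases hs with h | h <;> simp [h]
      rw [if_pos hs, ih, String.append_assoc, ← ofList_cons', hk]
    · by_cases hsp : x = ' '
      · have hk : (if x = 's' ∨ x = 'S' ∨ x = ' ' then x else '#') = x := by simp [hsp]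
        rw [if_neg hs, if_pos hsp, ih, String.append_assoc,
          show (" " : String) = String.ofList [' '] from rfl, ← ofList_cons', hk, hsp]
      · have hk : (if x = 's' ∨ x = 'S' ∨ x = ' ' then x else '#') = '#' := by
          rw [if_neg]; rintro (h1 | h2 | h3)
          · exact hs (Or.inl h1)
          · exact hs (Or.inr h2)
          · exact hsp h3
        rw [if_neg hs, if_neg hsp, ih, String.append_assoc,
          show ("#" : String) = String.ofList ['#'] from rfl, ← ofList_cons', hk]

-- ===== VERDICT (by name: the statement is the Claim_ definition above) =====
theorem Sfinnari_spec : Claim_equal_Sfinnari := by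
  intro strengur _
  unfold Spec_Sfinnari Sfinnari Sfinnari_alt
  simp only [Sfinnari_foldl]
  rfl
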